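-- pv_equiv track=rewrite | github.com/TheDukeVin/AMP | conform/staff/conform_solution.py | please_flip_one_pass
-- ===== SOURCE A (Python) =====
-- def please_flip_one_pass(caps: list[str])-> list[str]:
--     """
--     Generates a minimal list of shouts needed to have all fan caps face the same direction using exactly 1 for loop
--
--       Args:
--       caps: list of strings which are either 'F' (Forward) or 'B' (Backward)
--
--       Return:
--       a list of shouts, which could be empty if the list of caps is either empty or all the same direction
--     """
--     shouts = []
--
--     if not caps: return []
--
--     my_caps = caps + [caps[0]]
--     start = 0
--     for i in range(1, len(my_caps)):
--         if my_caps[i] != my_caps[i - 1]: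
--             if my_caps[i] != my_caps[0]:
--                 start = i
--             else:
--                 if start == i - 1:
--                     shouts.append(f"Person in position {i - 1} flip your cap!")
--                 else:
--                     shouts.append(f"People in positions {start} through {i - 1} flip your caps!")
--     return shouts
-- ===== SOURCE B (Python) =====
-- from itertools import groupby
--
--
-- def please_flip_one_pass(caps: list[str]) -> list[str]:
--     if not caps:
--         return []
--     first = caps[0]
--     # Partition caps into maximal runs of equal value: (value, start, length).
--     runs = []
--     pos = 0
--     for value, group in groupby(caps):
--         n = sum(1 for _ in group)
--         runs.append((value, pos, n))
--         pos += n
--     # Value of the run following each run (the first cap's value after the last run).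
--     next_values = [v for v, _, _ in runs[1:]] + [first]
--     shouts = []
--     for (value, start, n), nxt in zip(runs, next_values):
--         # shout for a run that differs from the first cap and is the last run of
--         # its block of non-first values (always the case for pure 'F'/'B' input)
--         if value != first and nxt == first:
--             end = start + n - 1
--             shouts.append(f"Person in position {start} flip your cap!" if n == 1
--                           else f"People in positions {start} through {end} flip your caps!")
--     return shouts
-- ===== Notes on version B (the rewrite author's own statement) =====
-- stated objective: alternative
-- what changed: A appends a sentinel copy of caps[0] and scans adjacent index pairs tracking a start variable; B first partitions caps into maximal runs via itertools.groupby (value, start, length) and then emits a shout per run that differs from caps[0] and is followed by a caps[0]-valued run (or is last), with no sentinel and no index arithmetic over caps.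
import Mathlib
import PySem

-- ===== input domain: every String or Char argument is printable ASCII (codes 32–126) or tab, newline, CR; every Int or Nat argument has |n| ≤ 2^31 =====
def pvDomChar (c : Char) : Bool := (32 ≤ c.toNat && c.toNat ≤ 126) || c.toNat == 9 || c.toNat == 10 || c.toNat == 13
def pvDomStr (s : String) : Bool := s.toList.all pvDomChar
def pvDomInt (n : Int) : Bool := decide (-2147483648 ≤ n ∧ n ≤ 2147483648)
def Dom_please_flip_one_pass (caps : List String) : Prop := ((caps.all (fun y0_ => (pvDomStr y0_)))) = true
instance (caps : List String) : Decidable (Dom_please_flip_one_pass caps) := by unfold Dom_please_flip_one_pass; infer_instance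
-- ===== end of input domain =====

-- B replaces A's sentinel-append adjacent-transition index scan by a decomposition into
-- maximal runs (itertools.groupby) followed by one pass over the runs paired with the
-- next run's value (objective: alternative decomposition, same cost).

-- ===== PORT A =====
-- the two f-string messages (shared formatting helpers; both Pythons contain these literals)
def pvSing (i : Int) : String :=
  "Person in position " ++ PySem.Int.toStr i ++ " flip your cap!"
def pvPlur (a b : Int) : String :=
  "People in positions " ++ PySem.Int.toStr a ++ " through " ++ PySem.Int.toStr b ++ " flip your caps!"

def please_flip_one_pass (caps : List String) : List String :=
  if caps = [] then []
  else
    let my_caps := caps ++ [PySem.List.pyGetD caps 0 ""]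
    let st := (PySem.List.pyRange 1 (my_caps.length : Int) 1).foldl
      (fun (st : Int × List String) i =>
        if PySem.List.pyGetD my_caps i "" ≠ PySem.List.pyGetD my_caps (i - 1) "" then
          if PySem.List.pyGetD my_caps i "" ≠ PySem.List.pyGetD my_caps 0 "" then
            (i, st.2)
          else
            if st.1 = i - 1 then (st.1, st.2 ++ [pvSing (i - 1)])
            else (st.1, st.2 ++ [pvPlur st.1 (i - 1)])
        else st)
      ((0 : Int), ([] : List String))
    st.2

-- ===== PORT B =====
-- itertools.groupby ported by hand: maximal runs of equal value as (value, start, length)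
def pvRuns : List String → Int → List (String × Int × Int)
  | [], _ => []
  | x :: xs, pos =>
    let n : Int := ((xs.takeWhile (fun y => y == x)).length : Int) + 1
    (x, pos, n) :: pvRuns (xs.dropWhile (fun y => y == x)) (pos + n)
  termination_by l _ => l.length
  decreasing_by
    simpa using Nat.lt_succ_of_le (List.length_dropWhile_le _ _)

def please_flip_one_pass_alt (caps : List String) : List String :=
  match caps with
  | [] => []
  | first :: _ =>
    let runs := pvRuns caps 0
    let next_values := (runs.drop 1).map (fun r => r.1) ++ [first]
    (runs.zip next_values).foldl
      (fun shouts rn =>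
        if rn.1.1 ≠ first ∧ rn.2 = first then
          shouts ++ [if rn.1.2.2 = 1 then pvSing rn.1.2.1
                     else pvPlur rn.1.2.1 (rn.1.2.1 + rn.1.2.2 - 1)]
        else shouts)
      []

-- ===== PRECONDITION & SPEC =====
def Spec_please_flip_one_pass (caps : List String) (out : List String) : Prop := out = please_flip_one_pass_alt caps
instance (caps : List String) (out : List String) : Decidable (Spec_please_flip_one_pass caps out) := by unfold Spec_please_flip_one_pass; infer_instance

-- ===== CLAIM (what is proved, stated in full; the proofs are below) =====
def Claim_equal_please_flip_one_pass : Prop := ∀ (caps : List String), Dom_please_flip_one_pass caps → Spec_please_flip_one_pass caps (please_flip_one_pass caps)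

-- ===== LEMMAS AND PROOFS =====

-- A's loop as a structural recursion over the remaining list (prev = previous element, i = index of head)
def walkA (first : String) : List String → String → Int → Int × List String → Int × List String
  | [], _, _, st => st
  | x :: xs, prev, i, st =>
    if x ≠ prev then
      if x ≠ first then walkA first xs x (i + 1) (i, st.2)
      else
        if st.1 = i - 1 then walkA first xs x (i + 1) (st.1, st.2 ++ [pvSing (i - 1)])
        else walkA first xs x (i + 1) (st.1, st.2 ++ [pvPlur st.1 (i - 1)])
    else walkA first xs x (i + 1) st

def pvShout (s e : Int) : String := if s = e then pvSing e else pvPlur s e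

-- what A emits from state (prev, i, start) on the remaining list, sentinel folded into the [] case
def emitFrom (first : String) : List String → String → Int → Int → List String
  | [], prev, i, start => if prev = first then [] else [pvShout start (i - 1)]
  | x :: xs, prev, i, start =>
    if x = prev then emitFrom first xs prev (i + 1) start
    else if x = first then pvShout start (i - 1) :: emitFrom first xs x (i + 1) start
    else emitFrom first xs x (i + 1) i

def headVal : List (String × Int × Int) → String → String
  | [], d => d
  | r :: _, _ => r.1

-- what B emits from a run list
def emit (first : String) : List (String × Int × Int) → List String
  | [] => []
  | r :: rest =>
    (if r.1 ≠ first ∧ headVal rest first = first then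
      [if r.2.2 = 1 then pvSing r.2.1 else pvPlur r.2.1 (r.2.1 + r.2.2 - 1)]
     else []) ++ emit first rest

-- A's pyRange fold equals walkA
theorem foldA_eq_walkA (l : List String) (first : String) (hf : first = PySem.List.pyGetD l 0 "")
    (j : Nat) (hj : 1 ≤ j) (hle : j ≤ l.length) (st : Int × List String) :
    (PySem.List.pyRange (j : Int) (l.length : Int) 1).foldl
      (fun (st : Int × List String) i =>
        if PySem.List.pyGetD l i "" ≠ PySem.List.pyGetD l (i - 1) "" then
          if PySem.List.pyGetD l i "" ≠ PySem.List.pyGetD l 0 "" then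
            (i, st.2)
          else
            if st.1 = i - 1 then (st.1, st.2 ++ [pvSing (i - 1)])
            else (st.1, st.2 ++ [pvPlur st.1 (i - 1)])
        else st) st
    = walkA first (l.drop j) (l.getD (j - 1) "") (j : Int) st := by
  subst hf
  induction hd : l.length - j generalizing j st with
  | zero =>
    have hj' : j = l.length := by omega
    subst hj'
    have h1 : PySem.List.pyRange (l.length : Int) (l.length : Int) 1 = [] := by
      simp [PySem.List.pyRange]
    rw [h1, List.drop_length, walkA]
    simp
  | succ m ih =>
    have hjlt : j < l.length := by omega
    have hcons : PySem.List.pyRange (j : Int) (l.length : Int) 1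
        = (j : Int) :: PySem.List.pyRange ((j : Int) + 1) (l.length : Int) 1 :=
      PySem.List.pyRange_one_cons (by exact_mod_cast hjlt)
    have hdrop : l.drop j = l[j] :: l.drop (j + 1) := List.drop_eq_getElem_cons hjlt
    have hgj : PySem.List.pyGetD l (j : Int) "" = l[j] := by
      rw [PySem.List.pyGetD_eq_getElem l "" (by positivity) (by exact_mod_cast hjlt)]
      simp
    have hgj1 : PySem.List.pyGetD l ((j : Int) - 1) "" = l.getD (j - 1) "" := by
      have hcast1 : ((j : Int) - 1) = ((j - 1 : Nat) : Int) := by omega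
      rw [hcast1, PySem.List.pyGetD_natCast]
    have hcast : ((j : Int) + 1) = ((j + 1 : Nat) : Int) := by push_cast; ring
    have hgetD : l.getD ((j + 1) - 1) "" = l[j] := by
      simp [List.getD_eq_getElem?_getD, hjlt]
    rw [hcons, List.foldl_cons, hdrop, walkA]
    simp only [hgj, hgj1]
    split_ifs with h1 h2 h3 <;>
      rw [hcast, ih (j + 1) (by omega) (by omega) _ (by omega), hgetD]

-- walkA's shouts are emitFrom (sentinel folded away)
theorem walkA_eq_emitFrom (first : String) (rest : List String) (prev : String)
    (i start : Int) (shouts : List String) :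
    (walkA first (rest ++ [first]) prev i (start, shouts)).2
      = shouts ++ emitFrom first rest prev i start := by
  induction rest generalizing prev i start shouts with
  | nil =>
    simp only [List.nil_append, walkA, emitFrom]
    by_cases h : prev = first
    · simp [h]
    · have h' : first ≠ prev := fun hh => h hh.symm
      rw [if_pos h']
      by_cases h3 : start = i - 1
      · simp [h3, pvShout, h]
      · simp [h3, pvShout, h]
  | cons x xs ih =>
    simp only [List.cons_append, walkA]
    by_cases h1 : x = prev
    · rw [if_neg (by simp [h1]), ih]
      simp [emitFrom, h1]
    · rw [if_pos (by simp [h1])]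
      by_cases h2 : x = first
      · rw [if_neg (by simp [h2])]
        have hpf : ¬ first = prev := h2 ▸ h1
        by_cases h3 : start = i - 1
        · rw [if_pos h3, ih]
          simp [emitFrom, h2, hpf, pvShout, h3]
        · rw [if_neg h3, ih]
          simp [emitFrom, h2, hpf, pvShout, h3]
      · rw [if_pos (by simp [h2]), ih]
        simp [emitFrom, h1, h2]

-- emitFrom consumes a block of elements equal to prev by only advancing the index
theorem emitFrom_eat (first prev : String) (xs rest : List String)
    (hxs : ∀ x ∈ xs, x = prev) (i start : Int) :
    emitFrom first (xs ++ rest) prev i start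
      = emitFrom first rest prev (i + xs.length) start := by
  induction xs generalizing i with
  | nil => simp
  | cons y ys ih =>
    have hy : y = prev := hxs y (by simp)
    simp only [List.cons_append, emitFrom, if_pos hy]
    rw [ih (fun x hx => hxs x (by simp [hx]))]
    congr 1
    simp only [List.length_cons]
    push_cast
    omega

-- the bridge: A's emitFrom from a first-state equals B's emit over the runs
theorem emitFrom_first_eq_emit (first : String) (rest : List String) (i start : Int) :
    emitFrom first rest first i start = emit first (pvRuns rest i) := by
  generalize hn : rest.length = n
  induction n using Nat.strong_induction_on generalizing rest i start with
  | _ n ih =>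
  cases rest with
  | nil => simp [emitFrom, pvRuns, emit]
  | cons x xs =>
    have hsplit : xs.takeWhile (fun y => y == x) ++ xs.dropWhile (fun y => y == x) = xs :=
      List.takeWhile_append_dropWhile
    have htwmem : ∀ y ∈ xs.takeWhile (fun y => y == x), y = x :=
      fun y hy => by simpa using List.mem_takeWhile_imp hy
    have hlen : (xs.dropWhile (fun y => y == x)).length ≤ xs.length :=
      List.length_dropWhile_le _ _
    have harg : i + (((xs.takeWhile (fun y => y == x)).length : Int) + 1)
        = i + 1 + ((xs.takeWhile (fun y => y == x)).length : Int) := by omega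
    by_cases hx : x = first
    · -- leading first-valued run: both sides skip it
      subst hx
      rw [pvRuns, emit, if_neg (by simp)]
      simp only [List.nil_append]
      rw [emitFrom, if_pos rfl]
      have heat : emitFrom x xs x (i + 1) start
          = emitFrom x (xs.dropWhile (fun y => y == x)) x
              (i + 1 + ((xs.takeWhile (fun y => y == x)).length : Int)) start := by
        conv_lhs => rw [← hsplit]
        exact emitFrom_eat x x _ _ htwmem _ _
      rw [heat, ih _ (by simp only [← hn, List.length_cons]; omega) _ _ _ rfl, harg]
    · -- a block of non-first caps starts at index i
      rw [pvRuns]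
      rw [emitFrom, if_neg hx, if_neg hx]
      have heat : emitFrom first xs x (i + 1) i
          = emitFrom first (xs.dropWhile (fun y => y == x)) x
              (i + 1 + ((xs.takeWhile (fun y => y == x)).length : Int)) i := by
        conv_lhs => rw [← hsplit]
        exact emitFrom_eat first x _ _ htwmem _ _
      rw [heat]
      cases hdw : xs.dropWhile (fun y => y == x) with
      | nil =>
        simp only [pvRuns, emit, headVal, List.append_nil]
        rw [if_pos ⟨hx, trivial⟩]
        simp only [emitFrom]
        rw [if_neg (fun hh : x = first => hx hh)]
        by_cases h0 : (xs.takeWhile (fun y => y == x)).length = 0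
        · simp [pvShout, h0, pvSing]
        · have hc1 : ¬ (((xs.takeWhile (fun y => y == x)).length : Int) + 1 = 1) := by omega
          have hc2 : i = i + 1 + ((xs.takeWhile (fun y => y == x)).length : Int) - 1 ↔ False := by
            constructor
            · intro hh; omega
            · exact False.elim
          simp only [pvShout, if_neg hc1, hc2, if_false]
          congr 2
          omega
      | cons y ys =>
        have hy : (y == x) = false := by
          have h0 : xs.dropWhile (fun y => y == x) ≠ [] := by simp [hdw]
          have hh := List.head_dropWhile_not (fun y => y == x) h0
          simp only [hdw, List.head_cons] at hh
          exact hh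
        have hyx : y ≠ x := by simpa using hy
        have hlen2 : (y :: ys).length < n := by
          have h1 : (y :: ys).length ≤ xs.length := by rw [← hdw]; exact hlen
          simp only [List.length_cons] at hn h1 ⊢
          omega
        have hhv : ∀ (k : Int), headVal (pvRuns (y :: ys) k) first = y := by
          intro k
          rw [pvRuns]
          rfl
        by_cases hyf : y = first
        · -- the block ends here: A shouts for its last run, B's run has first next
          rw [emitFrom, if_neg (fun hh : y = x => hyx hh), if_pos hyf]
          have hstep : emitFrom first ys y
                (i + 1 + ((xs.takeWhile (fun y => y == x)).length : Int) + 1) i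
              = emitFrom first (y :: ys) first
                (i + 1 + ((xs.takeWhile (fun y => y == x)).length : Int)) i := by
            rw [emitFrom, if_pos hyf, hyf]
          rw [hstep, ih _ hlen2 _ _ _ rfl]
          rw [emit, if_pos ⟨hx, by rw [harg, hhv]; exact hyf⟩, harg]
          simp only [List.singleton_append]
          congr 1
          by_cases h0 : (xs.takeWhile (fun y => y == x)).length = 0
          · simp [pvShout, h0, pvSing]
          · have hc1 : ¬ (((xs.takeWhile (fun y => y == x)).length : Int) + 1 = 1) := by omega
            have hc2 : i = i + 1 + ((xs.takeWhile (fun y => y == x)).length : Int) - 1 ↔ False := by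
              constructor
              · intro hh; omega
              · exact False.elim
            simp only [pvShout, if_neg hc1, hc2, if_false]
        · -- another non-first run follows: no shout for this run on either side
          rw [emitFrom, if_neg (fun hh : y = x => hyx hh), if_neg hyf]
          have hstep : emitFrom first ys y
                (i + 1 + ((xs.takeWhile (fun y => y == x)).length : Int) + 1)
                (i + 1 + ((xs.takeWhile (fun y => y == x)).length : Int))
              = emitFrom first (y :: ys) first
                (i + 1 + ((xs.takeWhile (fun y => y == x)).length : Int)) i := by
            rw [emitFrom, if_neg hyf, if_neg hyf]
          rw [hstep, ih _ hlen2 _ _ _ rfl]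
          rw [emit, if_neg (by rintro ⟨-, h2⟩; rw [hhv] at h2; exact hyf h2), harg]
          simp

-- B's zip fold equals emit
theorem zipfold_eq_emit (first : String) (runs : List (String × Int × Int))
    (shouts : List String) :
    (runs.zip ((runs.drop 1).map (fun r => r.1) ++ [first])).foldl
      (fun shouts rn =>
        if rn.1.1 ≠ first ∧ rn.2 = first then
          shouts ++ [if rn.1.2.2 = 1 then pvSing rn.1.2.1
                     else pvPlur rn.1.2.1 (rn.1.2.1 + rn.1.2.2 - 1)]
        else shouts) shouts
    = shouts ++ emit first runs := by
  induction runs generalizing shouts with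
  | nil => simp [emit]
  | cons r rest ih =>
    have hz : (r :: rest).zip (((r :: rest).drop 1).map (fun r => r.1) ++ [first])
        = (r, headVal rest first) :: rest.zip ((rest.drop 1).map (fun r => r.1) ++ [first]) := by
      cases rest with
      | nil => simp [headVal]
      | cons r' rest' => simp [headVal]
    rw [hz, List.foldl_cons, ih]
    by_cases h : r.1 ≠ first ∧ headVal rest first = first
    · simp only [emit, if_pos h]
      simp
    · simp only [emit, if_neg h]
      simp

-- skipping the leading first-valued run
theorem emit_skip_first_run (c : String) (cs : List String) (j : Int) :
    emit c (pvRuns cs j)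
      = emit c (pvRuns (cs.dropWhile (fun y => y == c))
          (j + ((cs.takeWhile (fun y => y == c)).length : Int))) := by
  cases cs with
  | nil => simp
  | cons d ds =>
    by_cases hd : d = c
    · subst hd
      rw [pvRuns]
      simp only [List.takeWhile_cons, List.dropWhile_cons, beq_self_eq_true, if_true]
      rw [emit, if_neg (by simp)]
      simp only [List.nil_append, List.length_cons]
      congr 1
    · simp [hd]

-- ===== VERDICT (by name: the statement is the Claim_ definition above) =====
theorem please_flip_one_pass_spec : Claim_equal_please_flip_one_pass := by
  intro caps _
  unfold Spec_please_flip_one_pass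
  cases caps with
  | nil => rfl
  | cons c cs =>
    have hc0 : PySem.List.pyGetD (c :: cs) 0 "" = c := by
      simp [PySem.List.pyGetD, PySem.List.pyIdx?, PySem.List.pyGet?]
    have hf : c = PySem.List.pyGetD ((c :: cs) ++ [c]) 0 "" := by
      simp only [List.cons_append]
      simp [PySem.List.pyGetD, PySem.List.pyIdx?, PySem.List.pyGet?]
      rw [if_pos (by positivity)]
      rfl
    have hA : please_flip_one_pass (c :: cs) = emit c (pvRuns cs 1) := by
      unfold please_flip_one_pass
      rw [if_neg (by simp)]
      simp only [hc0]
      have H := foldA_eq_walkA ((c :: cs) ++ [c]) c hf 1 (le_refl 1) (by simp)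
        ((0 : Int), ([] : List String))
      simp only [Nat.cast_one] at H
      rw [H]
      have hdrop1 : ((c :: cs) ++ [c]).drop 1 = cs ++ [c] := rfl
      have hgetD0 : ((c :: cs) ++ [c]).getD (1 - 1) "" = c := rfl
      rw [hdrop1, hgetD0, walkA_eq_emitFrom, emitFrom_first_eq_emit, List.nil_append]
    have hB : please_flip_one_pass_alt (c :: cs) = emit c (pvRuns (c :: cs) 0) := by
      unfold please_flip_one_pass_alt
      change ((pvRuns (c :: cs) 0).zip
          (((pvRuns (c :: cs) 0).drop 1).map (fun r => r.1) ++ [c])).foldl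
          (fun shouts rn =>
            if rn.1.1 ≠ c ∧ rn.2 = c then
              shouts ++ [if rn.1.2.2 = 1 then pvSing rn.1.2.1
                         else pvPlur rn.1.2.1 (rn.1.2.1 + rn.1.2.2 - 1)]
            else shouts) [] = emit c (pvRuns (c :: cs) 0)
      rw [zipfold_eq_emit, List.nil_append]
    rw [hA, hB, pvRuns, emit, if_neg (by simp), List.nil_append, emit_skip_first_run c cs 1]
    congr 2
    omega
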